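-- pv_equiv track=rewrite | github.com/Jzaroli/Leetcode | medium/num_islands.py | count_islands_divisible
-- ===== SOURCE A (Python) =====
-- def count_islands_divisible(grid, k):
--     m, n = len(grid), len(grid[0])
--     visited = [[False]*n for _ in range(m)]
--
--     def dfs(r, c):
--         if r<0 or r>=m or c<0 or c>=n or visited[r][c] or grid[r][c]==0:
--             return 0
--         visited[r][c] = True
--         s = grid[r][c]
--         s += dfs(r+1, c)
--         s += dfs(r-1, c)
--         s += dfs(r, c+1)
--         s += dfs(r, c-1)
--         return s
--
--     count = 0
--     for i in range(m):
--         for j in range(n):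
--             if grid[i][j] > 0 and not visited[i][j]:
--                 total = dfs(i,j)
--                 if total % k == 0:
--                     count += 1
--     return count
-- ===== SOURCE B (Python) =====
-- def count_islands_divisible(grid, k):
--     m, n = len(grid), len(grid[0])
--     seen = set()
--     sums = []
--     for i, j in ((i, j) for i in range(m) for j in range(n)):
--         if grid[i][j] > 0 and (i, j) not in seen:
--             total = 0
--             stack = [(i, j)]
--             while stack:
--                 r, c = stack.pop()
--                 if 0 <= r < m and 0 <= c < n and (r, c) not in seen and grid[r][c] != 0:
--                     seen.add((r, c))
--                     total += grid[r][c]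
--                     stack += [(r, c - 1), (r, c + 1), (r - 1, c), (r + 1, c)]
--             sums.append(total)
--     return sum(1 for s in sums if s % k == 0)
-- ===== Notes on version B (the rewrite author's own statement) =====
-- stated objective: alternative
-- what changed: The recursive four-way DFS over a boolean visited matrix is replaced by an iterative flood fill with an explicit stack over a set of visited coordinates, driven by one flat loop over all cells, and the counting is staged: component sums are first collected into a list and the divisible ones are counted in a final pass; Pre_ excludes the inputs where A raises (empty grid, a row shorter than the first row, and k == 0 with a positive cell present), on which B raises the same exceptions.
import Mathlib
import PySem

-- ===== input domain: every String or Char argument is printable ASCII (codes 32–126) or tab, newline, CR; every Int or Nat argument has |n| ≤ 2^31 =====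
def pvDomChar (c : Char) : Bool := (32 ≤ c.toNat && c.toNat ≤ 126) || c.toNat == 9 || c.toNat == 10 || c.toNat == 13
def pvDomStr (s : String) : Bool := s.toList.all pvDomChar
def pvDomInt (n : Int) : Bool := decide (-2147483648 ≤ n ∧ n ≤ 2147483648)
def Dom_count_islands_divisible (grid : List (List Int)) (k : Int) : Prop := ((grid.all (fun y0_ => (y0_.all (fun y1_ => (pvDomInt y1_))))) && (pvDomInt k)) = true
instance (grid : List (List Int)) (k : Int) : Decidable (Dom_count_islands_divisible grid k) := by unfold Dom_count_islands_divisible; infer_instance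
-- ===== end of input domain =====

-- B replaces A's recursive DFS over a boolean visited matrix by an iterative flood fill with an
-- explicit stack over a SET of visited coordinates, one flat loop over all cells, and staged
-- counting (collect component sums, then count the divisible ones); the equivalence is about
-- return values only (both keep their visited structure local, neither mutates its arguments).

-- ===== PORT A =====
-- A's low-level helpers: grid[r][c], visited[r][c], visited[r][c] = True
def pvCell (grid : List (List Int)) (r c : Nat) : Int := (grid.getD r []).getD c 0
def pvVGet (v : List (List Bool)) (r c : Nat) : Bool := (v.getD r []).getD c false
def pvVSet : List (List Bool) → Nat → Nat → List (List Bool)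
  | [], _, _ => []
  | row :: rs, 0, c => row.set c true :: rs
  | row :: rs, r+1, c => row :: pvVSet rs r c

-- A's recursive dfs; the Nat argument is fuel, never exhausted for fuel ≥ #unvisited cells + 1
-- (each deeper call happens after a fresh cell is marked), proven by the fuel-stability lemmas below.
def dfsA (grid : List (List Int)) (m n : Int) : Nat → List (List Bool) → Int → Int → Int × List (List Bool)
  | 0, v, _, _ => (0, v)
  | fuel+1, v, r, c =>
    if r < 0 ∨ m ≤ r ∨ c < 0 ∨ n ≤ c ∨ pvVGet v r.toNat c.toNat = true ∨ pvCell grid r.toNat c.toNat = 0 then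
      (0, v)
    else
      let v1 := pvVSet v r.toNat c.toNat
      let a := dfsA grid m n fuel v1 (r+1) c
      let b := dfsA grid m n fuel a.2 (r-1) c
      let d := dfsA grid m n fuel b.2 r (c+1)
      let e := dfsA grid m n fuel d.2 r (c-1)
      (pvCell grid r.toNat c.toNat + a.1 + b.1 + d.1 + e.1, e.2)

def count_islands_divisible (grid : List (List Int)) (k : Int) : Int :=
  let m := grid.length
  let n := (grid.headD []).length   -- len(grid[0]); Pre_ excludes grid = [], where Python raises IndexError
  ((List.range m).foldl (fun st i =>
    (List.range n).foldl (fun st j =>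
      if pvCell grid i j > 0 ∧ pvVGet st.2 i j = false then
        let r := dfsA grid (m : Int) (n : Int) (m * n + 1) st.2 (i : Int) (j : Int)
        (if PySem.Int.mod r.1 k = 0 then st.1 + 1 else st.1, r.2)
      else st) st)
    ((0 : Int), List.replicate m (List.replicate n false))).1

-- ===== PORT B =====
-- B's while loop: pop the top of the stack (head of the list; Python pushes
-- (r,c-1),(r,c+1),(r-1,c),(r+1,c) at the end, so (r+1,c) is on top), mark in the seen-set,
-- accumulate the total; fuel counts pops, sufficient at |stack| + 4 * #unmarked cells (proof below).
def loopS (grid : List (List Int)) (m n : Int) : Nat → List (Int × Int) → List (Int × Int) → Int → Int × List (Int × Int)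
  | 0, _, seen, t => (t, seen)
  | _+1, [], seen, t => (t, seen)
  | fuel+1, (r, c) :: rest, seen, t =>
    if 0 ≤ r ∧ r < m ∧ 0 ≤ c ∧ c < n ∧ (r, c) ∉ seen ∧ (grid.getD r.toNat []).getD c.toNat 0 ≠ 0 then
      loopS grid m n fuel ((r+1, c) :: (r-1, c) :: (r, c+1) :: (r, c-1) :: rest)
        (PySem.Set.add seen (r, c)) (t + (grid.getD r.toNat []).getD c.toNat 0)
    else
      loopS grid m n fuel rest seen t

def count_islands_divisible_alt (grid : List (List Int)) (k : Int) : Int :=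
  let m := grid.length
  let n := (grid.headD []).length
  let cells := (List.range m).flatMap (fun (i : Nat) => (List.range n).map (fun (j : Nat) => ((i : Int), (j : Int))))
  let st := cells.foldl (fun (st : List Int × List (Int × Int)) ij =>
      if (grid.getD ij.1.toNat []).getD ij.2.toNat 0 > 0 ∧ ij ∉ st.2 then
        let r := loopS grid (m : Int) (n : Int) (4 * (m * n) + 1) [ij] st.2 0
        (st.1 ++ [r.1], r.2)
      else st) ([], [])
  st.1.foldl (fun acc s => if PySem.Int.mod s k = 0 then acc + 1 else acc) 0

-- ===== PRECONDITION & SPEC =====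
-- Pre_ excludes exactly the inputs where Python A raises: the empty grid (IndexError on grid[0]),
-- grids with a row shorter than the first row (IndexError while scanning), and k = 0 when some
-- positive cell lies in the scanned first-row-width columns (ZeroDivisionError); B raises there too.
def Pre_count_islands_divisible (grid : List (List Int)) (k : Int) : Prop :=
  grid ≠ [] ∧
  (∀ row ∈ grid, (grid.headD []).length ≤ row.length) ∧
  (k ≠ 0 ∨ ∀ row ∈ grid, ∀ x ∈ row.take (grid.headD []).length, x ≤ 0)
instance (grid : List (List Int)) (k : Int) : Decidable (Pre_count_islands_divisible grid k) := by
  unfold Pre_count_islands_divisible; infer_instance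

def pvWitness_count_islands_divisible : List (List Int) × Int := ([[1, 2, 0], [0, -1, 3]], 3)

def Spec_count_islands_divisible (grid : List (List Int)) (k : Int) (out : Int) : Prop := out = count_islands_divisible_alt grid k
instance (grid : List (List Int)) (k : Int) (out : Int) : Decidable (Spec_count_islands_divisible grid k out) := by unfold Spec_count_islands_divisible; infer_instance

-- ===== CLAIM (what is proved, stated in full; the proofs are below) =====
def Claim_equal_count_islands_divisible : Prop := ∀ (grid : List (List Int)) (k : Int), Dom_count_islands_divisible grid k → Pre_count_islands_divisible grid k → Spec_count_islands_divisible grid k (count_islands_divisible grid k)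

-- ===== LEMMAS AND PROOFS =====

-- proof-only helper: A's stack machine on A's visited MATRIX; the bridge between the two ports is
-- (a) loopS ≃ loopM under the matrix/set relation Rel, (b) loopM ≃ dfsA by the simulation lemma.
def loopM (grid : List (List Int)) (m n : Int) : Nat → List (Int × Int) → List (List Bool) → Int → Int × List (List Bool)
  | 0, _, v, t => (t, v)
  | _+1, [], v, t => (t, v)
  | fuel+1, (r, c) :: rest, v, t =>
    if r < 0 ∨ m ≤ r ∨ c < 0 ∨ n ≤ c ∨ pvVGet v r.toNat c.toNat = true ∨ pvCell grid r.toNat c.toNat = 0 then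
      loopM grid m n fuel rest v t
    else
      loopM grid m n fuel ((r+1, c) :: (r-1, c) :: (r, c+1) :: (r, c-1) :: rest)
        (pvVSet v r.toNat c.toNat) (t + pvCell grid r.toNat c.toNat)

-- shape invariant of the visited matrix and the count of unvisited cells
def pvShape (m n : Nat) (v : List (List Bool)) : Prop :=
  v.length = m ∧ ∀ i, i < m → (v.getD i []).length = n
def pvUnv (v : List (List Bool)) : Nat := (v.map (fun row => row.count false)).sum

theorem pvVSet_length (v : List (List Bool)) : ∀ (r c : Nat), (pvVSet v r c).length = v.length := by
  induction v with
  | nil => intro r c; rfl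
  | cons row rs ih =>
    intro r c
    cases r with
    | zero => simp [pvVSet]
    | succ r => simp [pvVSet, ih r c]

theorem pvVSet_rowlen (v : List (List Bool)) : ∀ (r c i : Nat),
    ((pvVSet v r c).getD i []).length = (v.getD i []).length := by
  induction v with
  | nil => intro r c i; rfl
  | cons row rs ih =>
    intro r c i
    cases r with
    | zero => cases i <;> simp [pvVSet]
    | succ r =>
      cases i with
      | zero => simp [pvVSet]
      | succ i =>
        simp only [pvVSet, List.getD_cons_succ]
        exact ih r c i

theorem pvShape_vset {m n : Nat} {v : List (List Bool)} (h : pvShape m n v) (r c : Nat) :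
    pvShape m n (pvVSet v r c) := by
  obtain ⟨h1, h2⟩ := h
  exact ⟨by rw [pvVSet_length, h1], fun i hi => by rw [pvVSet_rowlen]; exact h2 i hi⟩

theorem count_false_set (row : List Bool) : ∀ (c : Nat), c < row.length →
    row.getD c false = false → (row.set c true).count false + 1 = row.count false := by
  induction row with
  | nil => intro c hc hf; simp at hc
  | cons b bs ih =>
    intro c hc hf
    cases c with
    | zero =>
      simp [List.getD] at hf
      subst hf
      simp
    | succ c =>
      simp at hc
      simp [List.getD] at hf
      have := ih c hc (by simpa [List.getD] using hf)
      cases b <;> simp <;> omega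

theorem pvUnv_vset (v : List (List Bool)) : ∀ (r c : Nat), r < v.length →
    c < (v.getD r []).length → pvVGet v r c = false →
    pvUnv (pvVSet v r c) + 1 = pvUnv v := by
  induction v with
  | nil => intro r c hr; simp at hr
  | cons row rs ih =>
    intro r c hr hc hf
    cases r with
    | zero =>
      simp [List.getD] at hc hf
      simp only [pvVSet, pvUnv, List.map, List.sum_cons]
      have := count_false_set row c hc (by simpa [pvVGet, List.getD] using hf)
      simp only [pvUnv] at *
      omega
    | succ r =>
      simp at hr
      simp only [pvVSet, pvUnv, List.map, List.sum_cons]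
      have := ih r c hr (by simpa [List.getD] using hc) (by simpa [pvVGet, List.getD] using hf)
      simp only [pvUnv] at this
      omega

theorem pvUnv_le {v : List (List Bool)} : ∀ {m n : Nat}, pvShape m n v → pvUnv v ≤ m * n := by
  induction v with
  | nil => intro m n _; simp [pvUnv]
  | cons row rs ih =>
    intro m n h
    obtain ⟨h1, h2⟩ := h
    simp at h1
    have hrow : row.length = n := by
      have := h2 0 (by omega)
      simpa [List.getD] using this
    have hrs : pvShape rs.length n rs := by
      refine ⟨rfl, fun i hi => ?_⟩
      have := h2 (i+1) (by omega)
      simpa [List.getD] using this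
    have h3 : pvUnv rs ≤ rs.length * n := ih hrs
    have h4 : row.count false ≤ n := hrow ▸ List.count_le_length
    simp only [pvUnv, List.map, List.sum_cons]
    have : m * n = n + rs.length * n := by
      subst h1; ring
    simp only [pvUnv] at h3
    omega

-- dfsA preserves the shape and does not increase the number of unvisited cells
theorem dfsA_inv (grid : List (List Int)) (mN nN : Nat) : ∀ (fuel : Nat) (v : List (List Bool)) (r c : Int),
    pvShape mN nN v →
    pvShape mN nN (dfsA grid mN nN fuel v r c).2 ∧ pvUnv (dfsA grid mN nN fuel v r c).2 ≤ pvUnv v := by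
  intro fuel
  induction fuel with
  | zero => intro v r c hs; exact ⟨hs, le_refl _⟩
  | succ fuel ih =>
    intro v r c hs
    rw [dfsA]
    split
    · exact ⟨hs, le_refl _⟩
    · rename_i hg
      simp only []
      have hs1 : pvShape mN nN (pvVSet v r.toNat c.toNat) := pvShape_vset hs _ _
      have hr : r.toNat < v.length := by
        obtain ⟨h1, _⟩ := hs; rw [h1]; omega
      have hc : c.toNat < (v.getD r.toNat []).length := by
        obtain ⟨h1, h2⟩ := hs
        rw [h2 r.toNat (by omega)]; omega
      have hf : pvVGet v r.toNat c.toNat = false := by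
        cases h : pvVGet v r.toNat c.toNat
        · rfl
        · exact absurd (Or.inr (Or.inr (Or.inr (Or.inr (Or.inl h))))) hg
      have hd : pvUnv (pvVSet v r.toNat c.toNat) + 1 = pvUnv v := pvUnv_vset v _ _ hr hc hf
      obtain ⟨sa, ua⟩ := ih (pvVSet v r.toNat c.toNat) (r+1) c hs1
      obtain ⟨sb, ub⟩ := ih _ (r-1) c sa
      obtain ⟨sd, ud⟩ := ih _ r (c+1) sb
      obtain ⟨se, ue⟩ := ih _ r (c-1) sd
      exact ⟨se, by omega⟩

theorem dfsA_succ (grid : List (List Int)) (mN nN : Nat) : ∀ (fuel : Nat) (v : List (List Bool)) (r c : Int),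
    pvShape mN nN v → pvUnv v + 1 ≤ fuel →
    dfsA grid mN nN fuel v r c = dfsA grid mN nN (fuel+1) v r c := by
  intro fuel
  induction fuel with
  | zero => intro v r c _ h; omega
  | succ fuel ih =>
    intro v r c hs hfu
    rw [dfsA, dfsA]
    split
    · rfl
    · rename_i hg
      simp only []
      have hs1 : pvShape mN nN (pvVSet v r.toNat c.toNat) := pvShape_vset hs _ _
      have hr : r.toNat < v.length := by obtain ⟨h1, _⟩ := hs; rw [h1]; omega
      have hc : c.toNat < (v.getD r.toNat []).length := by
        obtain ⟨h1, h2⟩ := hs; rw [h2 r.toNat (by omega)]; omega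
      have hf : pvVGet v r.toNat c.toNat = false := by
        cases h : pvVGet v r.toNat c.toNat
        · rfl
        · exact absurd (Or.inr (Or.inr (Or.inr (Or.inr (Or.inl h))))) hg
      have hd : pvUnv (pvVSet v r.toNat c.toNat) + 1 = pvUnv v := pvUnv_vset v _ _ hr hc hf
      have e1 : dfsA grid mN nN fuel (pvVSet v r.toNat c.toNat) (r+1) c
              = dfsA grid mN nN (fuel+1) (pvVSet v r.toNat c.toNat) (r+1) c :=
        ih _ (r+1) c hs1 (by omega)
      rw [← e1]
      obtain ⟨sa, ua⟩ := dfsA_inv grid mN nN fuel (pvVSet v r.toNat c.toNat) (r+1) c hs1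
      have e2 : dfsA grid mN nN fuel (dfsA grid mN nN fuel (pvVSet v r.toNat c.toNat) (r+1) c).2 (r-1) c
              = dfsA grid mN nN (fuel+1) _ (r-1) c := ih _ (r-1) c sa (by omega)
      rw [← e2]
      obtain ⟨sb, ub⟩ := dfsA_inv grid mN nN fuel _ (r-1) c sa
      have e3 := ih (dfsA grid mN nN fuel (dfsA grid mN nN fuel (pvVSet v r.toNat c.toNat) (r+1) c).2 (r-1) c).2 r (c+1) sb (by omega)
      rw [← e3]
      obtain ⟨sd, ud⟩ := dfsA_inv grid mN nN fuel _ r (c+1) sb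
      have e4 := ih _ r (c-1) sd (by omega)
      rw [← e4]

theorem dfsA_ge (grid : List (List Int)) (mN nN : Nat) (fuel : Nat) (v : List (List Bool)) (r c : Int)
    (hs : pvShape mN nN v) (hfu : pvUnv v + 1 ≤ fuel) :
    dfsA grid mN nN fuel v r c = dfsA grid mN nN (pvUnv v + 1) v r c := by
  have key : ∀ d, dfsA grid mN nN (pvUnv v + 1 + d) v r c = dfsA grid mN nN (pvUnv v + 1) v r c := by
    intro d
    induction d with
    | zero => rfl
    | succ d ih =>
      rw [← ih]
      exact (dfsA_succ grid mN nN (pvUnv v + 1 + d) v r c hs (by omega)).symm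
  have : fuel = pvUnv v + 1 + (fuel - (pvUnv v + 1)) := by omega
  rw [this, key]

theorem loopM_nil (grid : List (List Int)) (m n : Int) (fuel : Nat) (v : List (List Bool)) (t : Int) :
    loopM grid m n fuel [] v t = (t, v) := by
  cases fuel <;> rfl

theorem loopM_succ (grid : List (List Int)) (mN nN : Nat) : ∀ (fuel : Nat) (stack : List (Int × Int)) (v : List (List Bool)) (t : Int),
    pvShape mN nN v → stack.length + 4 * pvUnv v ≤ fuel →
    loopM grid mN nN fuel stack v t = loopM grid mN nN (fuel+1) stack v t := by
  intro fuel
  induction fuel with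
  | zero =>
    intro stack v t _ h
    have : stack = [] := by
      cases stack with
      | nil => rfl
      | cons a s => simp at h
    subst this
    rw [loopM_nil, loopM_nil]
  | succ fuel ih =>
    intro stack v t hs hfu
    cases stack with
    | nil => rw [loopM_nil, loopM_nil]
    | cons p rest =>
      obtain ⟨r, c⟩ := p
      rw [loopM, loopM]
      split
      · exact ih rest v t hs (by simp at hfu; omega)
      · rename_i hg
        have hs1 : pvShape mN nN (pvVSet v r.toNat c.toNat) := pvShape_vset hs _ _
        have hr : r.toNat < v.length := by obtain ⟨h1, _⟩ := hs; rw [h1]; omega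
        have hc : c.toNat < (v.getD r.toNat []).length := by
          obtain ⟨h1, h2⟩ := hs; rw [h2 r.toNat (by omega)]; omega
        have hf : pvVGet v r.toNat c.toNat = false := by
          cases h : pvVGet v r.toNat c.toNat
          · rfl
          · exact absurd (Or.inr (Or.inr (Or.inr (Or.inr (Or.inl h))))) hg
        have hd : pvUnv (pvVSet v r.toNat c.toNat) + 1 = pvUnv v := pvUnv_vset v _ _ hr hc hf
        apply ih
        · exact hs1
        · simp at hfu ⊢; omega

theorem loopM_ge (grid : List (List Int)) (mN nN : Nat) (fuel : Nat) (stack : List (Int × Int)) (v : List (List Bool)) (t : Int)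
    (hs : pvShape mN nN v) (hfu : stack.length + 4 * pvUnv v ≤ fuel) :
    loopM grid mN nN fuel stack v t = loopM grid mN nN (stack.length + 4 * pvUnv v) stack v t := by
  have key : ∀ d, loopM grid mN nN (stack.length + 4 * pvUnv v + d) stack v t
      = loopM grid mN nN (stack.length + 4 * pvUnv v) stack v t := by
    intro d
    induction d with
    | zero => rfl
    | succ d ih =>
      rw [← ih]
      exact (loopM_succ grid mN nN (stack.length + 4 * pvUnv v + d) stack v t hs (by omega)).symm
  have : fuel = stack.length + 4 * pvUnv v + (fuel - (stack.length + 4 * pvUnv v)) := by omega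
  rw [this, key]

-- canonical (fuel-sufficient) versions, used only inside the proofs
def dfsC (grid : List (List Int)) (mN nN : Nat) (v : List (List Bool)) (r c : Int) : Int × List (List Bool) :=
  dfsA grid mN nN (pvUnv v + 1) v r c
def loopC (grid : List (List Int)) (mN nN : Nat) (stack : List (Int × Int)) (v : List (List Bool)) (t : Int) : Int × List (List Bool) :=
  loopM grid mN nN (stack.length + 4 * pvUnv v) stack v t

theorem loopC_nil (grid : List (List Int)) (mN nN : Nat) (v : List (List Bool)) (t : Int) :
    loopC grid mN nN [] v t = (t, v) := by
  unfold loopC; rw [loopM_nil]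

-- the stack machine simulates the recursion: popping (r,c) runs exactly dfs(r,c)
theorem sim (grid : List (List Int)) (mN nN : Nat) : ∀ (u : Nat) (v : List (List Bool)), pvUnv v = u → pvShape mN nN v →
    ∀ (r c : Int) (rest : List (Int × Int)) (t : Int),
    loopC grid mN nN ((r, c) :: rest) v t
      = loopC grid mN nN rest (dfsC grid mN nN v r c).2 (t + (dfsC grid mN nN v r c).1) := by
  intro u
  induction u using Nat.strong_induction_on with
  | _ u ih =>
    intro v hu hs r c rest t
    unfold loopC dfsC
    rw [dfsA]
    conv_lhs => rw [show ((r, c) :: rest).length + 4 * pvUnv v = (rest.length + 4 * pvUnv v) + 1 by simp; ring, loopM]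
    split
    · simp only []
      rw [show t + 0 = t by ring]
    · rename_i hg
      simp only []
      have hs1 : pvShape mN nN (pvVSet v r.toNat c.toNat) := pvShape_vset hs _ _
      have hr : r.toNat < v.length := by obtain ⟨h1, _⟩ := hs; rw [h1]; omega
      have hc : c.toNat < (v.getD r.toNat []).length := by
        obtain ⟨h1, h2⟩ := hs; rw [h2 r.toNat (by omega)]; omega
      have hf : pvVGet v r.toNat c.toNat = false := by
        cases h : pvVGet v r.toNat c.toNat
        · rfl
        · exact absurd (Or.inr (Or.inr (Or.inr (Or.inr (Or.inl h))))) hg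
      have hd : pvUnv (pvVSet v r.toNat c.toNat) + 1 = pvUnv v := pvUnv_vset v _ _ hr hc hf
      set v1 := pvVSet v r.toNat c.toNat with hv1
      set s0 := pvCell grid r.toNat c.toNat with hs0
      have efa : dfsA grid mN nN (pvUnv v) v1 (r+1) c = dfsC grid mN nN v1 (r+1) c := by
        unfold dfsC; rw [show pvUnv v = pvUnv v1 + 1 by omega]
      obtain ⟨sa, ua⟩ := dfsA_inv grid mN nN (pvUnv v1 + 1) v1 (r+1) c hs1
      set A1 := dfsC grid mN nN v1 (r+1) c with hA1
      have saA : pvShape mN nN A1.2 := sa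
      have uaA : pvUnv A1.2 ≤ pvUnv v1 := ua
      have efb : dfsA grid mN nN (pvUnv v) A1.2 (r-1) c = dfsC grid mN nN A1.2 (r-1) c :=
        dfsA_ge grid mN nN (pvUnv v) A1.2 (r-1) c saA (by omega)
      obtain ⟨sb, ub⟩ := dfsA_inv grid mN nN (pvUnv A1.2 + 1) A1.2 (r-1) c saA
      set A2 := dfsC grid mN nN A1.2 (r-1) c with hA2
      have sbA : pvShape mN nN A2.2 := sb
      have ubA : pvUnv A2.2 ≤ pvUnv A1.2 := ub
      have efd : dfsA grid mN nN (pvUnv v) A2.2 r (c+1) = dfsC grid mN nN A2.2 r (c+1) :=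
        dfsA_ge grid mN nN (pvUnv v) A2.2 r (c+1) sbA (by omega)
      obtain ⟨sd, ud⟩ := dfsA_inv grid mN nN (pvUnv A2.2 + 1) A2.2 r (c+1) sbA
      set A3 := dfsC grid mN nN A2.2 r (c+1) with hA3
      have sdA : pvShape mN nN A3.2 := sd
      have udA : pvUnv A3.2 ≤ pvUnv A2.2 := ud
      have efe : dfsA grid mN nN (pvUnv v) A3.2 r (c-1) = dfsC grid mN nN A3.2 r (c-1) :=
        dfsA_ge grid mN nN (pvUnv v) A3.2 r (c-1) sdA (by omega)
      set A4 := dfsC grid mN nN A3.2 r (c-1) with hA4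
      rw [efa, efb, efd, efe]
      have lfuel : rest.length + 4 * pvUnv v
          = ((r+1, c) :: (r-1, c) :: (r, c+1) :: (r, c-1) :: rest).length + 4 * pvUnv v1 := by
        simp; omega
      rw [lfuel]
      have step1 := ih (pvUnv v1) (by omega) v1 rfl hs1 (r+1) c ((r-1, c) :: (r, c+1) :: (r, c-1) :: rest) (t + s0)
      unfold loopC at step1
      rw [step1]
      have step2 := ih (pvUnv A1.2) (by omega) A1.2 rfl saA (r-1) c ((r, c+1) :: (r, c-1) :: rest) (t + s0 + A1.1)
      unfold loopC at step2
      rw [step2]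
      have step3 := ih (pvUnv A2.2) (by omega) A2.2 rfl sbA r (c+1) ((r, c-1) :: rest) (t + s0 + A1.1 + A2.1)
      unfold loopC at step3
      rw [step3]
      have step4 := ih (pvUnv A3.2) (by omega) A3.2 rfl sdA r (c-1) rest (t + s0 + A1.1 + A2.1 + A3.1)
      unfold loopC at step4
      rw [step4]
      rw [show t + s0 + A1.1 + A2.1 + A3.1 + A4.1 = t + (s0 + A1.1 + A2.1 + A3.1 + A4.1) by ring]

theorem shape_init (m n : Nat) : pvShape m n (List.replicate m (List.replicate n false)) := by
  refine ⟨by simp, fun i hi => ?_⟩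
  rw [List.getD_eq_getElem?_getD]
  simp [hi]

-- loopM at fuel 4*(m*n)+1 from a single start IS dfsA at fuel m*n+1 (total accumulated from 0)
theorem body_eq (grid : List (List Int)) (mN nN : Nat) (v : List (List Bool)) (i j : Nat)
    (hs : pvShape mN nN v) :
    loopM grid mN nN (4 * (mN * nN) + 1) [((i : Int), (j : Int))] v 0
      = (0 + (dfsA grid mN nN (mN * nN + 1) v i j).1, (dfsA grid mN nN (mN * nN + 1) v i j).2) := by
  have hle : pvUnv v ≤ mN * nN := pvUnv_le hs
  have e1 : dfsA grid mN nN (mN * nN + 1) v i j = dfsC grid mN nN v i j :=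
    dfsA_ge grid mN nN _ v i j hs (by omega)
  have e2 : loopM grid mN nN (4 * (mN * nN) + 1) [((i : Int), (j : Int))] v 0
      = loopC grid mN nN [((i : Int), (j : Int))] v 0 := by
    unfold loopC
    exact loopM_ge grid mN nN _ _ v 0 hs (by simp; omega)
  rw [e1, e2, sim grid mN nN (pvUnv v) v rfl hs i j [] 0, loopC_nil]

-- ===== the matrix/set bridge =====

-- the relation between A's visited matrix and B's seen-set: same marks on all in-range cells
def pvRel (mN nN : Nat) (v : List (List Bool)) (seen : List (Int × Int)) : Prop :=
  pvShape mN nN v ∧ ∀ r c : Int, 0 ≤ r → r < (mN : Int) → 0 ≤ c → c < (nN : Int) →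
    (pvVGet v r.toNat c.toNat = true ↔ (r, c) ∈ seen)

theorem pvVGet_vset (v : List (List Bool)) : ∀ (r c a b : Nat), c < (v.getD r []).length →
    pvVGet (pvVSet v r c) a b = (if r = a ∧ c = b then true else pvVGet v a b) := by
  induction v with
  | nil => intro r c a b hc; simp [List.getD] at hc
  | cons row rs ih =>
    intro r c a b hc
    cases r with
    | zero =>
      simp [List.getD] at hc
      cases a with
      | zero =>
        simp only [pvVSet, pvVGet, List.getD_cons_zero]
        rw [List.getD_eq_getElem?_getD, List.getD_eq_getElem?_getD, List.getElem?_set]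
        by_cases hb : c = b
        · subst hb; simp [hc]
        · simp [hb]
      | succ a => simp [pvVSet, pvVGet, List.getD]
    | succ r =>
      cases a with
      | zero => simp [pvVSet, pvVGet, List.getD]
      | succ a =>
        simp only [pvVSet, pvVGet, List.getD_cons_succ]
        have := ih r c a b (by simpa [List.getD] using hc)
        simp only [pvVGet] at this
        rw [this]
        have hcond : (r = a ∧ c = b) ↔ (r + 1 = a + 1 ∧ c = b) := by omega
        by_cases h : r = a ∧ c = b
        · simp [h]
        · simp [List.getD_eq_getElem?_getD, h]

theorem pvVGet_init (m n a b : Nat) : pvVGet (List.replicate m (List.replicate n false)) a b = false := by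
  by_cases h : a < m
  · by_cases h' : b < n <;> simp [pvVGet, List.getD_eq_getElem?_getD, h, h']
  · simp [pvVGet, List.getD_eq_getElem?_getD, h]

theorem pvRel_init (mN nN : Nat) : pvRel mN nN (List.replicate mN (List.replicate nN false)) [] := by
  refine ⟨shape_init mN nN, fun r c _ _ _ _ => ?_⟩
  simp [pvVGet_init]

theorem pvRel_mark {mN nN : Nat} {v : List (List Bool)} {seen : List (Int × Int)} {r c : Int}
    (h : pvRel mN nN v seen) (hr0 : 0 ≤ r) (hrm : r < (mN : Int)) (hc0 : 0 ≤ c) (hcn : c < (nN : Int)) :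
    pvRel mN nN (pvVSet v r.toNat c.toNat) (PySem.Set.add seen (r, c)) := by
  obtain ⟨hs, hiff⟩ := h
  refine ⟨pvShape_vset hs _ _, fun a b ha0 ham hb0 hbn => ?_⟩
  have hclen : c.toNat < (v.getD r.toNat []).length := by
    rw [hs.2 r.toNat (by omega)]; omega
  rw [pvVGet_vset v r.toNat c.toNat a.toNat b.toNat hclen]
  rw [PySem.Set.mem_add seen (r, c) (a, b)]
  by_cases heq : r.toNat = a.toNat ∧ c.toNat = b.toNat
  · have h1 : a = r := by omega
    have h2 : b = c := by omega
    simp [heq, h1, h2]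
  · have hne : ¬((a, b) = (r, c)) := by
      rw [Prod.ext_iff]; intro h'; exact heq ⟨by omega, by omega⟩
    simp only [heq, if_false, hne, or_false]
    exact hiff a b ha0 ham hb0 hbn

-- loopS on the seen-set computes the same total as loopM on the related matrix, preserving Rel
theorem loopS_eq_loopM (grid : List (List Int)) (mN nN : Nat) : ∀ (fuel : Nat) (stack : List (Int × Int)) (v : List (List Bool)) (seen : List (Int × Int)) (t : Int),
    pvRel mN nN v seen →
    (loopS grid mN nN fuel stack seen t).1 = (loopM grid mN nN fuel stack v t).1 ∧
    pvRel mN nN (loopM grid mN nN fuel stack v t).2 (loopS grid mN nN fuel stack seen t).2 := by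
  intro fuel
  induction fuel with
  | zero => intro stack v seen t h; exact ⟨rfl, h⟩
  | succ fuel ih =>
    intro stack v seen t h
    cases stack with
    | nil => exact ⟨rfl, h⟩
    | cons p rest =>
      obtain ⟨r, c⟩ := p
      obtain ⟨hs, hiff⟩ := h
      rw [loopS, loopM]
      by_cases hA : r < 0 ∨ (mN : Int) ≤ r ∨ c < 0 ∨ (nN : Int) ≤ c ∨ pvVGet v r.toNat c.toNat = true ∨ pvCell grid r.toNat c.toNat = 0
      · rw [if_pos hA]
        have hB : ¬(0 ≤ r ∧ r < (mN : Int) ∧ 0 ≤ c ∧ c < (nN : Int) ∧ (r, c) ∉ seen ∧ (grid.getD r.toNat []).getD c.toNat 0 ≠ 0) := by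
          rintro ⟨h1, h2, h3, h4, h5, h6⟩
          rcases hA with h' | h' | h' | h' | h' | h'
          · omega
          · omega
          · omega
          · omega
          · exact h5 ((hiff r c h1 h2 h3 h4).mp h')
          · exact h6 h'
        rw [if_neg hB]
        exact ih rest v seen t ⟨hs, hiff⟩
      · rw [if_neg hA]
        push Not at hA
        obtain ⟨h1, h2, h3, h4, h5, h6⟩ := hA
        have hB : 0 ≤ r ∧ r < (mN : Int) ∧ 0 ≤ c ∧ c < (nN : Int) ∧ (r, c) ∉ seen ∧ (grid.getD r.toNat []).getD c.toNat 0 ≠ 0 := by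
          refine ⟨h1, h2, h3, h4, ?_, h6⟩
          intro hin
          exact absurd ((hiff r c h1 h2 h3 h4).mpr hin) (by simp [h5])
        rw [if_pos hB]
        have hrel : pvRel mN nN (pvVSet v r.toNat c.toNat) (PySem.Set.add seen (r, c)) :=
          pvRel_mark ⟨hs, hiff⟩ h1 h2 h3 h4
        have : pvCell grid r.toNat c.toNat = (grid.getD r.toNat []).getD c.toNat 0 := rfl
        rw [← this]
        exact ih _ _ _ _ hrel
  
-- a fold over two states related by R stays related while both step functions respect R
theorem foldl_rel {σ τ α : Type} (R : σ → τ → Prop) (f : σ → α → σ) (g : τ → α → τ) (l : List α)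
    (h : ∀ s t a, a ∈ l → R s t → R (f s a) (g t a)) :
    ∀ s t, R s t → R (l.foldl f s) (l.foldl g t) := by
  induction l with
  | nil => intro s t hr; exact hr
  | cons a l ihl =>
    intro s t hr
    simp only [List.foldl_cons]
    exact ihl (fun s t a ha => h s t a (List.mem_cons_of_mem _ ha)) _ _ (h s t a (List.mem_cons_self) hr)

-- ===== VERDICT (by name: the statement is the Claim_ definition above) =====
theorem count_islands_divisible_spec : Claim_equal_count_islands_divisible := by
  intro grid k _hdom _hpre
  unfold Spec_count_islands_divisible
  simp only [count_islands_divisible, count_islands_divisible_alt]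
  set mN := grid.length with hm
  set nN := (grid.headD []).length with hn
  set fA : Int × List (List Bool) → Nat → Int × List (List Bool) := fun st i =>
    (List.range nN).foldl (fun st j =>
      if pvCell grid i j > 0 ∧ pvVGet st.2 i j = false then
        let r := dfsA grid (mN : Int) (nN : Int) (mN * nN + 1) st.2 (i : Int) (j : Int)
        (if PySem.Int.mod r.1 k = 0 then st.1 + 1 else st.1, r.2)
      else st) st with hfA
  set gB : List Int × List (Int × Int) → Int × Int → List Int × List (Int × Int) := fun st ij =>
    if (grid.getD ij.1.toNat []).getD ij.2.toNat 0 > 0 ∧ ij ∉ st.2 then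
      let r := loopS grid (mN : Int) (nN : Int) (4 * (mN * nN) + 1) [ij] st.2 0
      (st.1 ++ [r.1], r.2)
    else st with hgB
  -- flatten B's single loop over all cells into the nested row/column loops
  have hflat : ∀ (s : List Int × List (Int × Int)),
      ((List.range mN).flatMap (fun (i : Nat) => (List.range nN).map (fun (j : Nat) => ((i : Int), (j : Int))))).foldl gB s
      = (List.range mN).foldl (fun s (i : Nat) => (List.range nN).foldl (fun s (j : Nat) => gB s ((i : Int), (j : Int))) s) s := by
    intro s
    rw [List.foldl_flatMap]
    simp only [List.foldl_map]
  rw [hflat]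
  -- relate the two nested folds: count = #divisible sums so far, matrix ∼ seen-set
  set R : Int × List (List Bool) → List Int × List (Int × Int) → Prop := fun sA sB =>
    sA.1 = sB.1.foldl (fun acc s => if PySem.Int.mod s k = 0 then acc + 1 else acc) 0 ∧
    pvRel mN nN sA.2 sB.2 with hR
  have hbody : ∀ (i j : Nat), i < mN → j < nN → ∀ sA sB, R sA sB →
      R ((fun (st : Int × List (List Bool)) (j : Nat) =>
            if pvCell grid i j > 0 ∧ pvVGet st.2 i j = false then
              let r := dfsA grid (mN : Int) (nN : Int) (mN * nN + 1) st.2 (i : Int) (j : Int)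
              (if PySem.Int.mod r.1 k = 0 then st.1 + 1 else st.1, r.2)
            else st) sA j) (gB sB ((i : Int), (j : Int))) := by
    intro i j hi hj sA sB hr
    obtain ⟨hc, hrel⟩ := hr
    have hcell : (grid.getD ((i : Int)).toNat []).getD ((j : Int)).toNat 0 = pvCell grid i j := by
      simp [pvCell]
    have hvis : pvVGet sA.2 i j = false ↔ ((i : Int), (j : Int)) ∉ sB.2 := by
      have := hrel.2 (i : Int) (j : Int) (by omega) (by exact_mod_cast hi) (by omega) (by exact_mod_cast hj)
      simp only [Int.toNat_natCast] at this
      constructor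
      · intro hv hin; exact absurd (this.mpr hin) (by simp [hv])
      · intro hnin
        cases hv : pvVGet sA.2 i j
        · rfl
        · exact absurd (this.mp hv) hnin
    rw [hgB]
    simp only [hcell]
    by_cases hcond : pvCell grid i j > 0 ∧ pvVGet sA.2 i j = false
    · have hBc : pvCell grid i j > 0 ∧ ((i : Int), (j : Int)) ∉ sB.2 := ⟨hcond.1, hvis.mp hcond.2⟩
      rw [if_pos hcond, if_pos hBc]
      obtain ⟨heq, hrel'⟩ := loopS_eq_loopM grid mN nN (4 * (mN * nN) + 1)
        [((i : Int), (j : Int))] sA.2 sB.2 0 hrel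
      rw [body_eq grid mN nN sA.2 i j hrel.1] at heq hrel'
      simp only [zero_add] at heq hrel'
      refine ⟨?_, hrel'⟩
      simp [List.foldl_append, heq, ← hc]
    · rw [if_neg hcond, if_neg (fun h' => hcond ⟨h'.1, hvis.mpr h'.2⟩)]
      exact ⟨hc, hrel⟩
  have main : R ((List.range mN).foldl fA ((0 : Int), List.replicate mN (List.replicate nN false)))
      ((List.range mN).foldl (fun s (i : Nat) => (List.range nN).foldl (fun s (j : Nat) => gB s ((i : Int), (j : Int))) s) ([], []))
      := by
    have hinit : R ((0 : Int), List.replicate mN (List.replicate nN false)) ([], []) :=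
      ⟨rfl, pvRel_init mN nN⟩
    refine foldl_rel R fA _ (List.range mN) (fun sA sB i hi hr => ?_) _ _ hinit
    rw [hfA]
    refine foldl_rel R _ _ (List.range nN) (fun sA sB j hj hr => ?_) sA sB hr
    exact hbody i j (List.mem_range.mp hi) (List.mem_range.mp hj) sA sB hr
  exact main.1
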